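-- pv_equiv track=rewrite | github.com/MinKyeom/KMK-DREAM | Programmers/Lv1/유연근무제.py | solution
-- ===== SOURCE A (Python) =====
-- def solution(schedules, timelogs, startday):
--     result = 0
--
--     for num,LimitTime in enumerate(schedules):
--
--         # 요일 시작
--         count = startday
--
--         for person in timelogs[num]:
--             if person <= LimitTime+10:
--                 count+=1
--                 continue
--
--             elif count == 6 or count == 7:
--                 count+=1
--                 continue
--
--             else:
--                 break
--
--         else:
--             result+=1
--
--     return result
-- ===== SOURCE B (Python) =====
-- def solution(schedules, timelogs, startday):
--     # Stage 1: for each employee, the worst (max) arrival time among days that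
--     # are not weekend (day index i is weekend iff startday + i is 6 or 7).
--     i6, i7 = 6 - startday, 7 - startday
--     needs = []
--     for logs in timelogs:
--         need = None
--         for i, p in enumerate(logs):
--             if i != i6 and i != i7 and (need is None or p > need):
--                 need = p
--         needs.append(need)
--     # Stage 2: an employee passes iff that worst arrival is within limit + 10.
--     return sum(need is None or need <= limit + 10
--                for limit, need in zip(schedules, needs))
-- ===== Notes on version B (the rewrite author's own statement) =====
-- stated objective: alternative
-- what changed: B never compares individual days against the limit and has no running weekday counter or break/for-else: a first pass reduces each employee's log to a single threshold (the maximum arrival time over non-weekend day indices, weekend iff index equals 6-startday or 7-startday), and a second pass counts employees whose limit+10 meets that threshold with one comparison each.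
import Mathlib
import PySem

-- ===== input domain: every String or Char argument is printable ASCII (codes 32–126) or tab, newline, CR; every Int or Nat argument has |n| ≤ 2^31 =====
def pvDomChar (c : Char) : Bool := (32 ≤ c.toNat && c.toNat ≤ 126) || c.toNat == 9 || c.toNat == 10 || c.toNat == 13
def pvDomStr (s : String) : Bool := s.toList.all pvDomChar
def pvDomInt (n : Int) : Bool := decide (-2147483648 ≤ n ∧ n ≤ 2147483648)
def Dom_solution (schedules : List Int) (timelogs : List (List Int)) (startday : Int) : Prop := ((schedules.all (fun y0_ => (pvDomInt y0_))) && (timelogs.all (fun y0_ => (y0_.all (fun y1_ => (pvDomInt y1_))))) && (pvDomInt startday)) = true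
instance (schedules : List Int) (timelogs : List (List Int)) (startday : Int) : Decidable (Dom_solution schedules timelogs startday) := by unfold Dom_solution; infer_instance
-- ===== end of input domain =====

-- B replaces A's per-day limit check with a running weekday counter and break/for-else by a
-- staged reduction: the max arrival over non-weekend indices per employee, then one threshold
-- comparison per employee (objective: alternative).


-- ===== PORT A =====
-- inner 'for person in timelogs[num]: … else: …' loop: returns true iff the loop
-- completes without break (the for-else fires)
def solInner (limitTime : Int) : Int → List Int → Bool
  | _, [] => true
  | count, person :: rest =>
    if person ≤ limitTime + 10 then solInner limitTime (count + 1) rest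
    else if count = 6 ∨ count = 7 then solInner limitTime (count + 1) rest
    else false

def solution (schedules : List Int) (timelogs : List (List Int)) (startday : Int) : Int :=
  (PySem.List.enumerate schedules 0).foldl
    (fun result pair =>
      match PySem.List.pyGet? timelogs pair.1 with
      | some logs => if solInner pair.2 startday logs then result + 1 else result
      | none => result)   -- IndexError in Python; excluded by Pre_solution
    0

-- ===== PORT B =====
-- 'if i != i6 and i != i7 and (need is None or p > need): need = p'
def needStep (i6 i7 : Int) (need : Option Int) (ip : Int × Int) : Option Int :=
  if (!(ip.1 == i6) && !(ip.1 == i7)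
      && (match need with | none => true | some m => decide (m < ip.2))) then some ip.2 else need

-- the inner 'for i, p in enumerate(logs)' pass producing one employee's threshold
def needOf (startday : Int) (logs : List Int) : Option Int :=
  (PySem.List.enumerate logs 0).foldl (needStep (6 - startday) (7 - startday)) none

-- 'need is None or need <= limit + 10'
def passB (need : Option Int) (limit : Int) : Bool :=
  match need with | none => true | some m => decide (m ≤ limit + 10)

def solution_alt (schedules : List Int) (timelogs : List (List Int)) (startday : Int) : Int :=
  let needs := timelogs.map (needOf startday)
  ((schedules.zip needs).map (fun pr => if passB pr.2 pr.1 then (1 : Int) else 0)).sum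

-- ===== PRECONDITION & SPEC =====
-- Pre_ excludes exactly the inputs where A raises IndexError on timelogs[num]
def Pre_solution (schedules : List Int) (timelogs : List (List Int)) (startday : Int) : Prop :=
  schedules.length ≤ timelogs.length
instance (schedules : List Int) (timelogs : List (List Int)) (startday : Int) : Decidable (Pre_solution schedules timelogs startday) := by unfold Pre_solution; infer_instance

def pvWitness_solution : List Int × List (List Int) × Int := ([10, 20], [[15, 5], [25]], 5)

def Spec_solution (schedules : List Int) (timelogs : List (List Int)) (startday : Int) (out : Int) : Prop := out = solution_alt schedules timelogs startday
instance (schedules : List Int) (timelogs : List (List Int)) (startday : Int) (out : Int) : Decidable (Spec_solution schedules timelogs startday out) := by unfold Spec_solution; infer_instance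

-- ===== CLAIM (what is proved, stated in full; the proofs are below) =====
def Claim_equal_solution : Prop := ∀ (schedules : List Int) (timelogs : List (List Int)) (startday : Int), Dom_solution schedules timelogs startday → Pre_solution schedules timelogs startday → Spec_solution schedules timelogs startday (solution schedules timelogs startday)

-- ===== LEMMAS AND PROOFS =====

-- shifting the start of enumerate through an 'all'
lemma enum_shift_all (s : Int) (f : Int × Int → Bool) :
    ∀ (logs : List Int) (t : Int),
      (PySem.List.enumerate logs (s + t)).all f
        = (PySem.List.enumerate logs t).all (fun ip => f (s + ip.1, ip.2)) := by
  intro logs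
  induction logs with
  | nil => intro t; simp [PySem.List.enumerate_nil]
  | cons p rest ih =>
    intro t
    have h : s + t + 1 = s + (t + 1) := by ring
    simp [PySem.List.enumerate_cons, h, ih]

-- A's inner loop equals a per-day 'all' starting the index count at c
lemma inner_eq_all (limit : Int) :
    ∀ (logs : List Int) (c : Int),
      solInner limit c logs
        = (PySem.List.enumerate logs c).all
            (fun ip => decide (ip.2 ≤ limit + 10) || decide (ip.1 = 6) || decide (ip.1 = 7)) := by
  intro logs
  induction logs with
  | nil => intro c; simp [solInner, PySem.List.enumerate_nil]
  | cons p rest ih =>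
    intro c
    simp only [solInner, PySem.List.enumerate_cons, List.all_cons, ih]
    by_cases h1 : p ≤ limit + 10
    · simp [h1]
    · by_cases h2 : c = 6 ∨ c = 7
      · rcases h2 with h | h <;> simp [h1, h]
      · have h6 : ¬ c = 6 := fun h => h2 (Or.inl h)
        have h7 : ¬ c = 7 := fun h => h2 (Or.inr h)
        simp [h1, h6, h7]

-- B's max-threshold fold, checked against a limit, equals the per-day 'all'
lemma fold_need (i6 i7 L : Int) :
    ∀ (l : List (Int × Int)) (need : Option Int),
      passB (l.foldl (needStep i6 i7) need) L
        = (passB need L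
            && l.all (fun ip => decide (ip.1 = i6) || decide (ip.1 = i7) || decide (ip.2 ≤ L + 10))) := by
  intro l
  induction l with
  | nil => intro need; simp
  | cons hd tl ih =>
    intro need
    simp only [List.foldl_cons, List.all_cons]
    rw [ih]
    simp only [needStep]
    by_cases h6 : hd.1 = i6
    · simp [h6]
    · by_cases h7 : hd.1 = i7
      · simp [h7]
      · cases need with
        | none =>
          simp [h6, h7, passB]
        | some m =>
          by_cases hm : m < hd.2
          · by_cases hp : hd.2 ≤ L + 10
            · have hq : m ≤ L + 10 := by omega
              simp [h6, h7, hm, hp, hq, passB]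
            · simp [h6, h7, hm, hp, passB]
          · by_cases hq : m ≤ L + 10
            · have hp : hd.2 ≤ L + 10 := by omega
              simp [h6, h7, hm, hq, hp, passB]
            · simp [h6, h7, hm, hq, passB]

-- pointwise bridge between A's day condition (weekday = startday + i) and B's (i = 6-s / 7-s)
lemma all_pred_eq (s L : Int) (l : List (Int × Int)) :
    l.all (fun ip => decide (ip.2 ≤ L + 10) || decide (s + ip.1 = 6) || decide (s + ip.1 = 7))
      = l.all (fun ip => decide (ip.1 = 6 - s) || decide (ip.1 = 7 - s) || decide (ip.2 ≤ L + 10)) := by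
  induction l with
  | nil => rfl
  | cons hd tl ih =>
    simp only [List.all_cons, ih]
    congr 1
    by_cases h1 : hd.2 ≤ L + 10 <;> by_cases h2 : s + hd.1 = 6 <;> by_cases h3 : s + hd.1 = 7 <;>
      simp [h1, h2, h3] <;> omega

-- A's inner loop equals B's threshold comparison
lemma inner_eq_pass (s L : Int) (logs : List Int) :
    solInner L s logs = passB (needOf s logs) L := by
  have hshift := enum_shift_all s
    (fun ip => decide (ip.2 ≤ L + 10) || decide (ip.1 = 6) || decide (ip.1 = 7)) logs 0
  simp only [add_zero] at hshift
  rw [inner_eq_all, hshift, needOf, fold_need]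
  simp [passB, all_pred_eq]

-- the outer fold over enumerate, with the index generalized
lemma outer_fold (startday : Int) (timelogs : List (List Int)) :
    ∀ (sch : List Int) (n : Nat) (r : Int), n + sch.length ≤ timelogs.length →
      ((PySem.List.enumerate sch (Int.ofNat n)).foldl
        (fun result pair =>
          match PySem.List.pyGet? timelogs pair.1 with
          | some logs => if solInner pair.2 startday logs then result + 1 else result
          | none => result) r)
      = r + (((sch.zip (timelogs.drop n)).map
          (fun pr => if passB (needOf startday pr.2) pr.1 then (1 : Int) else 0)).sum) := by
  intro sch
  induction sch with
  | nil => intro n r _; simp [PySem.List.enumerate_nil]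
  | cons L rest ih =>
    intro n r hlen
    have hn : n < timelogs.length := by simp at hlen; omega
    have hget : PySem.List.pyGet? timelogs (Int.ofNat n) = some timelogs[n] := by
      simp [PySem.List.pyGet?_natCast, List.getElem?_eq_getElem hn]
    have hdrop : timelogs.drop n = timelogs[n] :: timelogs.drop (n + 1) :=
      List.drop_eq_getElem_cons hn
    have hcast : (Int.ofNat n) + 1 = Int.ofNat (n + 1) := rfl
    have hrec := ih (n + 1)
      (if solInner L startday timelogs[n] then r + 1 else r) (by simp at hlen ⊢; omega)
    simp only [PySem.List.enumerate_cons, List.foldl_cons, hget, hcast]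
    rw [hrec, hdrop]
    simp only [List.zip_cons_cons, List.map_cons, List.sum_cons, inner_eq_pass]
    split <;> ring

-- B's zip-with-mapped-needs form equals the zip-with-timelogs form
lemma alt_unfold (schedules : List Int) (timelogs : List (List Int)) (startday : Int) :
    solution_alt schedules timelogs startday
      = ((schedules.zip timelogs).map
          (fun pr => if passB (needOf startday pr.2) pr.1 then (1 : Int) else 0)).sum := by
  simp only [solution_alt, List.zip_map_right, List.map_map, Function.comp_def, Prod.map, id_eq]
  rfl

-- ===== VERDICT (by name: the statement is the Claim_ definition above) =====
theorem solution_spec : Claim_equal_solution := by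
  intro schedules timelogs startday _ hpre
  unfold Spec_solution solution
  rw [alt_unfold]
  have := outer_fold startday timelogs schedules 0 0 (by simpa using hpre)
  simpa using this
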